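-- pv_equiv track=rewrite | github.com/WexWorks/monti | training/deni_train/data/splits.py | _stratified_split_by_names
-- ===== SOURCE A (Python) =====
-- from collections import defaultdict
--
-- def _stratified_split_by_names(scene_names: list[str]) -> tuple[list[int], list[int]]:
--     """Core stratified split: hold out last ~10% per scene (minimum 1)."""
--     scene_indices: dict[str, list[int]] = defaultdict(list)
--     for i, name in enumerate(scene_names):
--         scene_indices[name].append(i)
--
--     train_indices: list[int] = []
--     val_indices: list[int] = []
--
--     for scene in sorted(scene_indices.keys()):
--         indices = scene_indices[scene]
--         n = len(indices)
--         n_val = max(1, n // 10)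
--         n_train = n - n_val
--         train_indices.extend(indices[:n_train])
--         val_indices.extend(indices[n_train:])
--
--     return train_indices, val_indices
-- ===== SOURCE B (Python) =====
-- def _stratified_split_by_names(scene_names: list[str]) -> tuple[list[int], list[int]]:
--     """Core stratified split: hold out last ~10% per scene (minimum 1)."""
--     train_indices: list[int] = []
--     val_indices: list[int] = []
--     for name in sorted(set(scene_names)):
--         indices = [i for i, s in enumerate(scene_names) if s == name]
--         n_train = len(indices) - max(1, len(indices) // 10)
--         train_indices += indices[:n_train]
--         val_indices += indices[n_train:]
--     return train_indices, val_indices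
-- ===== Notes on version B (the rewrite author's own statement) =====
-- stated objective: simpler
-- what changed: B drops the defaultdict grouping pass entirely: it iterates sorted(set(scene_names)) and recovers each scene's index list with a direct filtering comprehension over enumerate(scene_names), instead of building a dict of index lists and then sorting its keys.
import Mathlib
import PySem

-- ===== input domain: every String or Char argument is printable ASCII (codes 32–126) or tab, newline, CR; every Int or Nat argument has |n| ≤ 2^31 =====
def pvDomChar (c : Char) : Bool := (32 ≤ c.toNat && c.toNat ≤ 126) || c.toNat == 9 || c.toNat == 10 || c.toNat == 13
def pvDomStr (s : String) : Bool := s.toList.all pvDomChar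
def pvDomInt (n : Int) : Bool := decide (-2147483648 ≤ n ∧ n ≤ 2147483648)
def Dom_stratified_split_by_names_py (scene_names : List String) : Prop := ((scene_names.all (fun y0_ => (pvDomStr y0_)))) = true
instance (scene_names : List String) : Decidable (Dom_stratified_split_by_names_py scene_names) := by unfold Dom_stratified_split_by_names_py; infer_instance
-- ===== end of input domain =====

-- B replaces A's defaultdict grouping by iterating sorted distinct names and filtering indices per name; objective: simpler.

-- ===== PORT A =====
def stratified_split_by_names_py (scene_names : List String) : List Int × List Int :=
  let scene_indices : PySem.Dict String (List Int) :=
    (PySem.List.enumerate scene_names).foldl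
      (fun d p => d.modify p.2 [] (fun l => l ++ [p.1])) PySem.Dict.empty
  (PySem.List.sorted scene_indices.keys (fun x => x) false).foldl
    (fun tv scene =>
      let indices := scene_indices.getD scene []
      let n : Int := indices.length
      let n_val := max 1 (PySem.Int.floordiv n 10)
      let n_train := n - n_val
      (tv.1 ++ PySem.List.slice indices none (some n_train),
       tv.2 ++ PySem.List.slice indices (some n_train) none))
    ([], [])

-- ===== PORT B =====
def stratified_split_by_names_py_alt (scene_names : List String) : List Int × List Int :=
  (PySem.List.sorted (PySem.Set.ofList scene_names) (fun x => x) false).foldl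
    (fun tv name =>
      let indices := ((PySem.List.enumerate scene_names).filter (fun p => p.2 == name)).map (·.1)
      let n_train : Int := (indices.length : Int) - max 1 (PySem.Int.floordiv (indices.length : Int) 10)
      (tv.1 ++ PySem.List.slice indices none (some n_train),
       tv.2 ++ PySem.List.slice indices (some n_train) none))
    ([], [])

-- ===== PRECONDITION & SPEC =====
def Spec_stratified_split_by_names_py (scene_names : List String) (out : List Int × List Int) : Prop := out = stratified_split_by_names_py_alt scene_names
instance (scene_names : List String) (out : List Int × List Int) : Decidable (Spec_stratified_split_by_names_py scene_names out) := by unfold Spec_stratified_split_by_names_py; infer_instance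

-- ===== CLAIM (what is proved, stated in full; the proofs are below) =====
def Claim_equal_stratified_split_by_names_py : Prop := ∀ (scene_names : List String), Dom_stratified_split_by_names_py scene_names → Spec_stratified_split_by_names_py scene_names (stratified_split_by_names_py scene_names)

-- ===== LEMMAS AND PROOFS =====

-- A's grouping dict, looked up at any name, is exactly B's filtered index list.
theorem pv_getD_eq (scene_names : List String) (c : String) :
    ((PySem.List.enumerate scene_names).foldl
      (fun d p => d.modify p.2 [] (fun l => l ++ [p.1])) PySem.Dict.empty).getD c []
    = ((PySem.List.enumerate scene_names).filter (fun p => p.2 == c)).map (·.1) := by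
  have h := PySem.Dict.getD_foldl_modify_append
    (l := (PySem.List.enumerate scene_names).map (fun p => (p.2, p.1)))
    (d := PySem.Dict.empty) (c := c)
  rw [List.foldl_map] at h
  simp only [h, List.filter_map, List.map_map, PySem.Dict.getD_empty, List.nil_append]
  rfl

-- A's dict keys are the distinct scene names in first-occurrence order.
theorem pv_keys_eq (scene_names : List String) :
    ((PySem.List.enumerate scene_names).foldl
      (fun d p => d.modify p.2 [] (fun l => l ++ [p.1])) PySem.Dict.empty).keys
    = PySem.Set.ofList scene_names := by
  have h := PySem.Dict.keys_foldl_modify_key (PySem.List.enumerate scene_names)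
    (fun p => p.2) ([] : List Int) (fun _ p l => l ++ [p.1]) PySem.Dict.empty
  refine Eq.trans h ?_
  simp [PySem.List.map_snd_enumerate, PySem.Set.update, PySem.Set.ofList_eq_foldl,
    PySem.Dict.keys_empty]

-- ===== VERDICT (by name: the statement is the Claim_ definition above) =====
theorem stratified_split_by_names_py_spec : Claim_equal_stratified_split_by_names_py := by
  intro scene_names _
  unfold Spec_stratified_split_by_names_py stratified_split_by_names_py stratified_split_by_names_py_alt
  simp only [pv_keys_eq, pv_getD_eq]
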